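-- pv_equiv track=rewrite | github.com/VictorMinsky/Algorithmic-Tasks | Codewars/5 kyu/Double Cola.py | who_is_next
-- ===== SOURCE A (Python) =====
-- from math import ceil
--
-- def who_is_next(names, r):
--     if r <= len(names):
--         return names[r - 1]
--     else:
--         total = 0
--         n = 0
--         flag = False
--         length = len(names)
--         while total < r and not flag:
--             total += length * (2 ** n)
--             n += 1
--             if total + length * (2 ** n) >= r:
--                 flag = True
--         numInPlace = 2 ** n
--         remainder = r - total
--         place = ceil(remainder / numInPlace)
--         return names[place - 1]
-- ===== SOURCE B (Python) =====
-- def who_is_next(names, r):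
--     n = len(names)
--     m = (r - 1) // n + 1              # which "virtual row" r falls in, counting n-wide rows
--     k = m.bit_length() - 1            # the doubling block containing r is the k-th (rows 2^k .. 2^(k+1)-1)
--     return names[(r - n * ((1 << k) - 1) - 1) >> k]
-- ===== Notes on version B (the rewrite author's own statement) =====
-- stated objective: simpler
-- what changed: Replaced A's accumulator loop (running total, lookahead flag, float ceil, separate small-r branch) by a loop-free closed form: the doubling block containing r is computed directly with bit_length and the answer index with integer shifts.
-- outside the precondition, e.g. on who_is_next(['a', 'b', 'c'], 0): A returns 'c', B raises ValueError
import Mathlib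
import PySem

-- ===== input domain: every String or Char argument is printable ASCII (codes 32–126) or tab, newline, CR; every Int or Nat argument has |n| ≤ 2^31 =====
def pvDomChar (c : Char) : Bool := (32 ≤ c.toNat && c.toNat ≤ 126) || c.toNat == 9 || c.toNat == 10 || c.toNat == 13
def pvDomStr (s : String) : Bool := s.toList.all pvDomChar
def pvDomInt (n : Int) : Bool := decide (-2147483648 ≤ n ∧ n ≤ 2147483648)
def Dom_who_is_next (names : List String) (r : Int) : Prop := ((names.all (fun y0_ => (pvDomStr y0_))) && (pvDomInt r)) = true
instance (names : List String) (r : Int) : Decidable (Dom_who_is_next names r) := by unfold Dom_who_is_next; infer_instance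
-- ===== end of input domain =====

-- B replaces A's accumulator loop (total, lookahead flag, float ceil, special small-r branch)
-- by a loop-free closed form: the doubling block containing r is read off with bit_length and
-- the index computed with shifts (objective: simpler).

-- ===== PORT A =====
-- the while loop of A; fuel only makes the recursion total (64 steps are never exhausted when
-- the Python loop terminates within the stated domain, since total doubles roughly each step)
def whoLoopA (r L : Int) : Nat → Int → Nat → Bool → Int × Nat
  | 0, total, n, _ => (total, n)
  | fuel + 1, total, n, flag =>
    if total < r ∧ flag = false then
      let total' := total + L * ((2 ^ n : Nat) : Int)
      let n' := n + 1
      let flag' := if r ≤ total' + L * ((2 ^ n' : Nat) : Int) then true else flag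
      whoLoopA r L fuel total' n' flag'
    else (total, n)

def who_is_next (names : List String) (r : Int) : String :=
  if r ≤ (names.length : Int) then
    (PySem.List.pyGet? names (r - 1)).getD ""
  else
    let length : Int := names.length
    let p := whoLoopA r length 64 0 0 false
    let numInPlace : Int := ((2 ^ p.2 : Nat) : Int)
    let remainder : Int := r - p.1
    -- math.ceil(remainder / numInPlace): ported as exact integer ceiling division
    -- (exact on the domain: |remainder| ≤ 2^31 < 2^53, numInPlace a power of two, so the
    -- float division Python performs is exact and its ceil is the integer ceiling)
    let place : Int := -(PySem.Int.floordiv (-remainder) numInPlace)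
    (PySem.List.pyGet? names (place - 1)).getD ""

-- ===== PORT B =====
def who_is_next_alt (names : List String) (r : Int) : String :=
  let n : Int := names.length
  let m : Int := PySem.Int.floordiv (r - 1) n + 1
  let k : Nat := PySem.Int.bitLength m - 1
  (PySem.List.pyGet? names ((r - n * (((1 : Int) <<< k) - 1) - 1) >>> k)).getD ""

-- ===== PRECONDITION & SPEC =====
-- Pre_ excludes names = [] (A loops forever / raises) and r ≤ 0, where A only returns by
-- accidental negative-index wraparound through names[r - 1] while B raises; it excludes no
-- other input on which A returns.
def Pre_who_is_next (names : List String) (r : Int) : Prop :=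
  names.length ≠ 0 ∧ 1 ≤ r
instance (names : List String) (r : Int) : Decidable (Pre_who_is_next names r) := by
  unfold Pre_who_is_next; infer_instance

def pvWitness_who_is_next : List String × Int := (["Sheldon", "Leonard", "Penny"], 7)

def Spec_who_is_next (names : List String) (r : Int) (out : String) : Prop := out = who_is_next_alt names r
instance (names : List String) (r : Int) (out : String) : Decidable (Spec_who_is_next names r out) := by unfold Spec_who_is_next; infer_instance

-- ===== CLAIM (what is proved, stated in full; the proofs are below) =====
def Claim_equal_who_is_next : Prop := ∀ (names : List String) (r : Int), Dom_who_is_next names r → Pre_who_is_next names r → Spec_who_is_next names r (who_is_next names r)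

-- ===== LEMMAS AND PROOFS =====

-- ceiling division minus one is floor division of (a - 1)
lemma ceil_sub_one (a b : Int) (hb : 0 < b) :
    -(PySem.Int.floordiv (-a) b) - 1 = PySem.Int.floordiv (a - 1) b := by
  set q : Int := PySem.Int.floordiv (a - 1) b with hq
  have hqb : q * b ≤ a - 1 ∧ a - 1 < (q + 1) * b :=
    (PySem.Int.floordiv_eq_iff_of_pos hb).mp hq.symm
  have h2 : -(PySem.Int.floordiv (-a) b) = q + 1 := by
    refine (PySem.Int.neg_floordiv_neg_eq_iff_of_pos hb).mpr ⟨?_, ?_⟩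
    · have := hqb.1; nlinarith
    · have := hqb.2; nlinarith
  omega

-- characterisation of A's loop: starting from a consistent state it stops at the unique
-- doubling block containing r, with total = L*(2^N - 1) and L*(2^N - 1) < r ≤ L*(2^(N+1) - 1)
lemma loopA_spec (r L : Int) :
    ∀ (fuel : Nat) (total : Int) (n : Nat) (flag : Bool),
      total = L * (2 ^ n - 1) →
      total < r →
      flag = decide (r ≤ L * (2 ^ (n + 1) - 1)) →
      r ≤ L * (2 ^ (n + fuel + 1) - 1) →
      (whoLoopA r L fuel total n flag).1 = L * (2 ^ (whoLoopA r L fuel total n flag).2 - 1) ∧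
      L * (2 ^ (whoLoopA r L fuel total n flag).2 - 1) < r ∧
      r ≤ L * (2 ^ ((whoLoopA r L fuel total n flag).2 + 1) - 1) := by
  intro fuel
  induction fuel with
  | zero =>
    intro total n flag htot hlt hflag hfuel
    simp only [whoLoopA]
    exact ⟨htot, htot ▸ hlt, by simpa using hfuel⟩
  | succ fuel ih =>
    intro total n flag htot hlt hflag hfuel
    by_cases hblk : r ≤ L * (2 ^ (n + 1) - 1)
    · have hft : flag = true := by simp [hflag, hblk]
      have : ¬ (total < r ∧ flag = false) := by simp [hft]
      simp only [whoLoopA, if_neg this]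
      exact ⟨htot, htot ▸ hlt, hblk⟩
    · have hff : flag = false := by simp [hflag, hblk]
      have hcond : total < r ∧ flag = false := ⟨hlt, hff⟩
      simp only [whoLoopA, if_pos hcond]
      push_cast
      have e1 : total + L * 2 ^ n = L * (2 ^ (n + 1) - 1) := by rw [htot]; ring
      have e2 : total + L * 2 ^ n + L * 2 ^ (n + 1) = L * (2 ^ (n + 1 + 1) - 1) := by
        rw [htot]; ring
      refine ih (total + L * 2 ^ n) (n + 1) _ e1 (by omega) ?_ ?_
      · rw [hff, e2]
        by_cases h : r ≤ L * (2 ^ (n + 1 + 1) - 1) <;> simp [h]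
      · have : n + 1 + fuel + 1 = n + (fuel + 1) + 1 := by ring
        rw [this]; exact hfuel

-- bit_length of an integer strictly between two consecutive powers of two
lemma bitLength_of_bounds (m : Int) (N : Nat) (h1 : (2 : Int) ^ N ≤ m) (h2 : m < 2 ^ (N + 1)) :
    PySem.Int.bitLength m = N + 1 := by
  have hm0 : 0 < m := lt_of_lt_of_le (by positivity) h1
  have hna : m.natAbs = m.toNat := by omega
  have hlo : 2 ^ N ≤ m.natAbs := by
    have : ((2 : Nat) ^ N : Int) ≤ m := by push_cast; exact h1
    omega
  have hhi : m.natAbs < 2 ^ (N + 1) := by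
    have : m < ((2 : Nat) ^ (N + 1) : Int) := by push_cast; exact h2
    omega
  have hub := PySem.Int.lt_two_pow_bitLength m
  have hlb := PySem.Int.two_pow_bitLength_le m (by omega)
  have hN : N < PySem.Int.bitLength m := by
    by_contra h
    have : 2 ^ PySem.Int.bitLength m ≤ 2 ^ N :=
      Nat.pow_le_pow_right (by omega) (by omega)
    omega
  have hN2 : PySem.Int.bitLength m ≤ N + 1 := by
    by_contra h
    have : 2 ^ (N + 1) ≤ 2 ^ (PySem.Int.bitLength m - 1) :=
      Nat.pow_le_pow_right (by omega) (by omega)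
    omega
  omega

-- ===== VERDICT (by name: the statement is the Claim_ definition above) =====
theorem who_is_next_spec : Claim_equal_who_is_next := by
  intro names r hdom hpre
  obtain ⟨hne, hr1⟩ := hpre
  have hL : (1 : Int) ≤ names.length := by omega
  have hrhi : r ≤ 2147483648 := by
    unfold Dom_who_is_next pvDomInt at hdom
    simp at hdom
    exact hdom.2.2
  unfold Spec_who_is_next who_is_next who_is_next_alt
  set L : Int := (names.length : Int) with hLdef
  by_cases hr : r ≤ L
  · -- small r: the closed form lands in block 0 with index r - 1
    have hd : PySem.Int.floordiv (r - 1) L = 0 :=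
      (PySem.Int.floordiv_eq_iff_of_pos (by omega)).mpr ⟨by omega, by omega⟩
    have hb1 : PySem.Int.bitLength (PySem.Int.floordiv (r - 1) L + 1) = 1 := by
      rw [hd]; decide
    simp only [if_pos hr, hb1]
    norm_num
  · -- large r: characterise A's loop, identify its block with B's bit_length block
    have h0 : (0 : Int) = L * (2 ^ (0 : Nat) - 1) := by ring
    have hflag0 : (false : Bool) = decide (r ≤ L * (2 ^ (0 + 1 : Nat) - 1)) := by
      have : L * (2 ^ (0 + 1 : Nat) - 1) = L := by ring
      rw [this]; simp; omega
    have hfuel : r ≤ L * (2 ^ (0 + 64 + 1 : Nat) - 1) := by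
      have h2 : (2147483648 : Int) ≤ (2 ^ (65 : Nat) - 1 : Int) := by norm_num
      have : (2 ^ (65 : Nat) - 1 : Int) ≤ L * (2 ^ (65 : Nat) - 1) := by nlinarith
      calc r ≤ 2147483648 := hrhi
        _ ≤ (2 ^ (65 : Nat) - 1 : Int) := h2
        _ ≤ L * (2 ^ (65 : Nat) - 1) := this
        _ = L * (2 ^ (0 + 64 + 1 : Nat) - 1) := by norm_num
    obtain ⟨hres1, hres2, hres3⟩ :=
      loopA_spec r L 64 0 0 false h0 (by omega) hflag0 hfuel
    set N : Nat := (whoLoopA r L 64 0 0 false).2 with hN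
    -- B's m lies in [2^N, 2^(N+1)), so bit_length m = N + 1 and k = N
    have hdlo : (2 : Int) ^ N - 1 ≤ PySem.Int.floordiv (r - 1) L := by
      rw [PySem.Int.le_floordiv_iff_mul_le (by omega)]; nlinarith [hres2]
    have hdhi : PySem.Int.floordiv (r - 1) L < 2 ^ (N + 1) - 1 := by
      rw [PySem.Int.floordiv_lt_iff_lt_mul (by omega)]; nlinarith [hres3]
    have hbl : PySem.Int.bitLength (PySem.Int.floordiv (r - 1) L + 1) = N + 1 :=
      bitLength_of_bounds _ N (by omega) (by omega)
    simp only [if_neg hr, hbl]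
    have hk : N + 1 - 1 = N := by omega
    rw [hk]
    -- both index expressions are floordiv (r - L*(2^N - 1) - 1) (2^N)
    have hshl : ((1 : Int) <<< N) = 2 ^ N := by
      simp [Int.shiftLeft_eq]
    have hpow : (0 : Int) < 2 ^ N := by positivity
    have hshr : (r - L * (((1 : Int) <<< N) - 1) - 1) >>> N
        = PySem.Int.floordiv (r - L * (2 ^ N - 1) - 1) (2 ^ N) := by
      rw [hshl, PySem.Int.floordiv_eq_ediv_of_pos hpow, Int.shiftRight_eq_div_pow]
      norm_cast
    have hceil : -(PySem.Int.floordiv (-(r - (whoLoopA r L 64 0 0 false).1)) (2 ^ N)) - 1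
        = PySem.Int.floordiv (r - L * (2 ^ N - 1) - 1) (2 ^ N) := by
      rw [hres1, ceil_sub_one _ _ hpow]
    push_cast
    rw [hshr, ← hceil]
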